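-- pv_equiv track=rewrite | github.com/LifeJiggy/Solidify | hunts/flash_loan_hunter.py | _check_access_control
-- ===== SOURCE A (Python) =====
-- def _check_access_control(code: str) -> bool:
--     access_patterns = ["onlyOwner", "onlyKeeper", "onlyLiquidator", "hasRole", "whenNotPaused"]
--
--     liquidate_block = False
--     for line in code.split('\n'):
--         if "liquidate" in line.lower():
--             liquidate_block = True
--         elif liquidate_block:
--             if any(pattern in line for pattern in access_patterns):
--                 return True
--
--     return False
-- ===== SOURCE B (Python) =====
-- def _check_access_control(code: str) -> bool:
--     access_patterns = ["onlyOwner", "onlyKeeper", "onlyLiquidator", "hasRole", "whenNotPaused"]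
--     lines = code.split('\n')
--     return any(
--         "liquidate" in earlier.lower()
--         and "liquidate" not in later.lower()
--         and any(p in later for p in access_patterns)
--         for i, earlier in enumerate(lines)
--         for later in lines[i + 1:]
--     )
-- ===== Notes on version B (the rewrite author's own statement) =====
-- stated objective: alternative
-- what changed: Replaced A's stateful flag-carrying single pass with a declarative brute-force existence test over ordered line pairs: true iff some line mentioning the liquidation keyword (case-insensitive) is followed anywhere later by a line without that keyword that contains an access-control pattern.
import Mathlib
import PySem

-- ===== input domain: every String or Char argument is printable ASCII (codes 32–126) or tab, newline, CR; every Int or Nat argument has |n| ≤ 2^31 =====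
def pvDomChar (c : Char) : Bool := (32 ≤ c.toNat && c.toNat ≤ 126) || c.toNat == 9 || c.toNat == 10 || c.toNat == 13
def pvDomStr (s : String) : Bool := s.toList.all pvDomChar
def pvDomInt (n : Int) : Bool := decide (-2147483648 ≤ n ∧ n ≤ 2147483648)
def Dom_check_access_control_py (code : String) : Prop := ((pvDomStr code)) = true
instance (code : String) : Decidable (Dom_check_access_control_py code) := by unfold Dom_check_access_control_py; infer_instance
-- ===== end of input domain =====

-- B replaces A's stateful flag-carrying single pass with a declarative brute-force
-- existence test over ordered line pairs (objective: alternative; same return value).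

-- ===== PORT A =====
-- "liquidate" in line.lower()
def pvLiqLineA (line : String) : Bool := PySem.Str.isIn "liquidate" (PySem.Str.lower line)

-- any(pattern in line for pattern in access_patterns)
def pvHasPatA (line : String) : Bool :=
  ["onlyOwner", "onlyKeeper", "onlyLiquidator", "hasRole", "whenNotPaused"].any
    (fun pattern => PySem.Str.isIn pattern line)

-- the for-loop carrying the liquidate_block flag
def pvLoopA : List String → Bool → Bool
  | [], _ => false
  | line :: rest, liquidate_block =>
    if pvLiqLineA line then pvLoopA rest true
    else if liquidate_block then
      (if pvHasPatA line then true else pvLoopA rest liquidate_block)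
    else pvLoopA rest liquidate_block

def check_access_control_py (code : String) : Bool :=
  pvLoopA ((PySem.Str.split? code "\n").getD []) false

-- ===== PORT B =====
def pvLiqLineB (line : String) : Bool := PySem.Str.isIn "liquidate" (PySem.Str.lower line)

def pvHasPatB (line : String) : Bool :=
  ["onlyOwner", "onlyKeeper", "onlyLiquidator", "hasRole", "whenNotPaused"].any
    (fun p => PySem.Str.isIn p line)

-- any(... for i, earlier in enumerate(lines) for later in lines[i+1:])
def check_access_control_py_alt (code : String) : Bool :=
  let lines := (PySem.Str.split? code "\n").getD []
  (PySem.List.enumerate lines).any (fun p =>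
    pvLiqLineB p.2 &&
      (PySem.List.slice lines (some (p.1 + 1)) none).any (fun later =>
        (!pvLiqLineB later) && pvHasPatB later))

-- ===== PRECONDITION & SPEC =====
def Spec_check_access_control_py (code : String) (out : Bool) : Prop := out = check_access_control_py_alt code
instance (code : String) (out : Bool) : Decidable (Spec_check_access_control_py code out) := by unfold Spec_check_access_control_py; infer_instance

-- ===== CLAIM (what is proved, stated in full; the proofs are below) =====
def Claim_equal_check_access_control_py : Prop := ∀ (code : String), Dom_check_access_control_py code → Spec_check_access_control_py code (check_access_control_py code)

-- ===== LEMMAS AND PROOFS =====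

-- a "good" line: no liquidate, contains an access pattern
def pvGood (l : String) : Bool := (!pvLiqLineB l) && pvHasPatB l

-- recursive characterisation of B's pair scan
def pvQ : List String → Bool
  | [] => false
  | l :: r => (pvLiqLineB l && r.any pvGood) || pvQ r

theorem pvEnumAny (r : List String) : ∀ (full : List String) (s : Int), 0 ≤ s →
    full.drop s.toNat = r →
    ((PySem.List.enumerate r s).any (fun p =>
      pvLiqLineB p.2 &&
        (PySem.List.slice full (some (p.1 + 1)) none).any pvGood)) = pvQ r := by
  induction r with
  | nil => intro full s _ _; simp [PySem.List.enumerate_nil, pvQ]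
  | cons l rest ih =>
    intro full s hs hdrop
    have hs1 : (0:Int) ≤ s + 1 := by omega
    have hslice : PySem.List.slice full (some (s + 1)) none = full.drop (s + 1).toNat :=
      PySem.List.slice_from full hs1
    have htn : (s + 1).toNat = s.toNat + 1 := by omega
    have hdrop1 : full.drop (s.toNat + 1) = rest := by
      have := congrArg List.tail hdrop
      simpa [List.tail_drop] using this
    rw [PySem.List.enumerate_cons]
    simp only [List.any_cons, hslice, htn, hdrop1, ih full (s + 1) hs1 (by rw [htn]; exact hdrop1)]
    rfl

-- if some pair exists in r, then r already contains a good line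
theorem pvQ_imp_good (r : List String) : pvQ r = true → r.any pvGood = true := by
  induction r with
  | nil => simp [pvQ]
  | cons l rest ih =>
    intro h
    rcases Bool.or_eq_true_iff.mp h with h1 | h2
    · simp [List.any_cons, (Bool.and_eq_true_iff.mp h1).2]
    · simp [List.any_cons, ih h2]

-- A's loop with the flag set is exactly "any good line"
theorem pvLoopA_true (ls : List String) : pvLoopA ls true = ls.any pvGood := by
  induction ls with
  | nil => rfl
  | cons l rest ih =>
    by_cases hl : pvLiqLineA l
    · have hb : pvLiqLineB l = true := hl
      simp [pvLoopA, hl, pvGood, hb, ih]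
    · have hb : pvLiqLineB l = false := by simpa [pvLiqLineA, pvLiqLineB] using hl
      by_cases hp : pvHasPatA l
      · simp [pvLoopA, hl, hp, pvGood, hb, show pvHasPatB l = true from hp]
      · simp [pvLoopA, hl, hp, pvGood, hb,
          show pvHasPatB l = false from by simpa [pvHasPatA, pvHasPatB] using hp, ih]

-- A's loop with the flag clear equals the pair characterisation
theorem pvLoopA_false (ls : List String) : pvLoopA ls false = pvQ ls := by
  induction ls with
  | nil => rfl
  | cons l rest ih =>
    by_cases hl : pvLiqLineA l
    · have hb : pvLiqLineB l = true := by simpa [pvLiqLineA, pvLiqLineB] using hl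
      simp only [pvLoopA, hl, if_true, pvQ, hb, Bool.true_and, pvLoopA_true]
      cases hq : pvQ rest
      · simp
      · simp [pvQ_imp_good rest hq]
    · have hb : pvLiqLineB l = false := by simpa [pvLiqLineA, pvLiqLineB] using hl
      simp [pvLoopA, hl, pvQ, hb, ih]

-- ===== VERDICT (by name: the statement is the Claim_ definition above) =====
theorem check_access_control_py_spec : Claim_equal_check_access_control_py := by
  intro code _
  unfold Spec_check_access_control_py check_access_control_py check_access_control_py_alt
  set lines := (PySem.Str.split? code "\n").getD [] with hl
  rw [pvLoopA_false, ← pvEnumAny lines lines 0 le_rfl (by simp)]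
  rfl
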